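-- pv_equiv track=rewrite | github.com/AylaRT/D-Terminer | seq_bert_multi.py | map_capitalisation_termlist
-- ===== SOURCE A (Python) =====
-- def map_capitalisation_termlist(candidate_term_dict):
--     """
--     Given the candidate_term_dict from extract_terms_sbm, i.e., a dictionary with
--     {ct_original_caps: [list of all files in which ct occurs, one filename for each occurrence, so including doubles],
--     ...}
--     combine all cts which are identical apart from the capitalisation and create a new
--     dictionary with the same structure, in which the keys are those cts with the fewest
--     uppercase letters out of all occurrences in the corpus
--
--     :param candidate_term_dict: {ct_original_caps: [list of all files in which ct occurs,], ...}
--     :return: capscorrected_candidate_term_dict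
--     """
--     capscorrected_candidate_term_dict = {}
--     all_cts = list(candidate_term_dict.keys())
--     all_cts_lower = []
--     for ct in all_cts:
--         all_cts_lower.append(ct.lower())
--     for ct, ct_files in candidate_term_dict.items():
--         # if lowercased ct exists:
--         if ct == ct.lower() or ct.lower() in candidate_term_dict:
--             if ct.lower() not in capscorrected_candidate_term_dict:
--                 capscorrected_candidate_term_dict[ct.lower()] = ct_files
--             else:
--                 capscorrected_candidate_term_dict[ct.lower()] += ct_files
--         # if lowercased ct does not exist
--         else:
--             nr_occurrences_ct = all_cts_lower.count(ct.lower())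
--             if nr_occurrences_ct == 1:
--                 capscorrected_candidate_term_dict[ct] = ct_files
--             elif ct not in [x.lower() for x in candidate_term_dict.keys()] and \
--                     ct.lower() not in [x.lower() for x in capscorrected_candidate_term_dict.keys()]:
--                 ct_least_caps = ct
--                 ct_least_cap_freq = len(ct_files)
--                 least_nr_caps_ct = sum(1 for c in ct if c.isupper())
--                 combined_filelist = ct_files
--                 for ct_inner_loop, files_inner_loop in candidate_term_dict.items():
--                     if ct.lower() == ct_inner_loop.lower() and ct_inner_loop != ct:
--                         combined_filelist += files_inner_loop
--                         nr_caps_ct_inner_loop = sum(1 for c in ct_inner_loop if c.isupper())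
--                         if nr_caps_ct_inner_loop < least_nr_caps_ct:
--                             ct_least_caps = ct_inner_loop
--                             least_nr_caps_ct = nr_caps_ct_inner_loop
--                             ct_least_cap_freq = len(files_inner_loop)
--                         elif nr_caps_ct_inner_loop == least_nr_caps_ct:
--                             if len(files_inner_loop) > ct_least_cap_freq:
--                                 ct_least_caps = ct_inner_loop
--                                 least_nr_caps_ct = nr_caps_ct_inner_loop
--                                 ct_least_cap_freq = len(files_inner_loop)
--                 capscorrected_candidate_term_dict[ct_least_caps] = combined_filelist
--     return capscorrected_candidate_term_dict
-- ===== SOURCE B (Python) =====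
-- def map_capitalisation_termlist(candidate_term_dict):
--     # Single pass: bucket entries by lowercased key, then resolve each bucket once.
--     groups = {}
--     for ct, ct_files in candidate_term_dict.items():
--         groups.setdefault(ct.lower(), []).append((ct, ct_files))
--     out = {}
--     for low, members in groups.items():
--         if any(ct == low for ct, _ in members):
--             out[low] = [f for _, fs in members for f in fs]
--         elif len(members) == 1:
--             out[members[0][0]] = list(members[0][1])
--         else:
--             best = min(members,
--                        key=lambda m: (sum(1 for c in m[0] if c.isupper()), -len(m[1])))
--             out[best[0]] = [f for _, fs in members for f in fs]
--     return out
-- ===== Notes on version B (the rewrite author's own statement) =====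
-- stated objective: alternative
-- what changed: A rescans the whole dict for every key (membership tests, counts and an inner merge loop over all items per key); B makes one pass bucketing the entries by lowercased key into a dict, then resolves each bucket once (lowercase key present -> merge under it; singleton -> keep; otherwise min by (uppercase count, -frequency)).
import Mathlib
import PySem

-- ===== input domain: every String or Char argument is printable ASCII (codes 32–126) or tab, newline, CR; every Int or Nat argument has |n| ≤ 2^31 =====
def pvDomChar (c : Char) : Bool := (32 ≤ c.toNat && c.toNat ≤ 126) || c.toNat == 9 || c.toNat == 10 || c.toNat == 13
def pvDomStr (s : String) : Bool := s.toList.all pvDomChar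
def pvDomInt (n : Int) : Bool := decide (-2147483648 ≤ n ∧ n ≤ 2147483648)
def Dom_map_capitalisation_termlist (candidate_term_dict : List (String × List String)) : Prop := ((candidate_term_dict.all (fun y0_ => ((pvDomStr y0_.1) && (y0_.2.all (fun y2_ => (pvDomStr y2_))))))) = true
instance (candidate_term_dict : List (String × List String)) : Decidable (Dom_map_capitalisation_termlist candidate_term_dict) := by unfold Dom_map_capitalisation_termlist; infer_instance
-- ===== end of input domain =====

-- B merges capitalisation variants by a different algorithm: one pass bucketing keys on their
-- lowercase form, then resolving each bucket once (A instead re-scans the whole dict per key).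
-- NOTE: Python A mutates its argument's file lists in place (`+=`); B does not — the equivalence
-- proved here is about the RETURN value only.

-- sum(1 for c in ct if c.isupper())  — the same expression occurs in both Pythons
def pyCaps (s : String) : Int :=
  s.toList.foldl (fun n c => if PySem.Chars.isupper c then n + 1 else n) 0

-- ===== PORT A =====

-- the inner `for ct_inner_loop, files_inner_loop in candidate_term_dict.items():` loop;
-- state = (ct_least_caps, least_nr_caps_ct, ct_least_cap_freq, combined_filelist)
def mapCapsInner (candidate_term_dict : List (String × List String)) (ct : String)
    (ct_files : List String) : String × Int × Int × List String :=
  candidate_term_dict.foldl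
    (fun s q =>
      if PySem.Str.lower ct == PySem.Str.lower q.1 && q.1 != ct then
        let combined := s.2.2.2 ++ q.2
        let nc := pyCaps q.1
        if nc < s.2.1 then (q.1, nc, (q.2.length : Int), combined)
        else if nc == s.2.1 && (q.2.length : Int) > s.2.2.1 then (q.1, nc, (q.2.length : Int), combined)
        else (s.1, s.2.1, s.2.2.1, combined)
      else s)
    (ct, pyCaps ct, (ct_files.length : Int), ct_files)

-- the body of A's main `for ct, ct_files in candidate_term_dict.items():` loop
def mapCapsStep (candidate_term_dict : List (String × List String))
    (acc : PySem.Dict String (List String)) (p : String × List String) :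
    PySem.Dict String (List String) :=
  let ct := p.1
  let ct_files := p.2
  let lct := PySem.Str.lower ct
  if ct == lct || (candidate_term_dict.map Prod.fst).contains lct then
    if acc.contains lct = false then acc.insert lct ct_files
    else acc.modify lct [] (fun old => old ++ ct_files)
  else
    let all_cts_lower := (candidate_term_dict.map Prod.fst).map PySem.Str.lower
    let nr_occurrences_ct := all_cts_lower.count lct
    if nr_occurrences_ct == 1 then acc.insert ct ct_files
    else if all_cts_lower.contains ct = false
         && (acc.keys.map PySem.Str.lower).contains lct = false then
      let st := mapCapsInner candidate_term_dict ct ct_files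
      acc.insert st.1 st.2.2.2
    else acc

def map_capitalisation_termlist (candidate_term_dict : List (String × List String)) : List (String × List String) :=
  (candidate_term_dict.foldl (mapCapsStep candidate_term_dict) PySem.Dict.empty).items


-- ===== PORT B =====

-- the body of B's `for low, members in groups.items():` loop
def altResolve (o : PySem.Dict String (List String))
    (gp : String × List (String × List String)) : PySem.Dict String (List String) :=
  let members := gp.2
  if members.any (fun m => m.1 == gp.1) then
    o.insert gp.1 (members.flatMap (fun m => m.2))
  else if members.length == 1 then
    o.insert (members.headD ("", [])).1 (members.headD ("", [])).2
  else
    match PySem.List.min2? members (fun m => pyCaps m.1) (fun m => -((m.2.length : Int))) with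
    | some best => o.insert best.1 (members.flatMap (fun m => m.2))
    | none => o

def map_capitalisation_termlist_alt (candidate_term_dict : List (String × List String)) : List (String × List String) :=
  let groups : PySem.Dict String (List (String × List String)) :=
    candidate_term_dict.foldl
      (fun g p => g.modify (PySem.Str.lower p.1) [] (fun ms => ms ++ [p]))
      PySem.Dict.empty
  (groups.items.foldl altResolve PySem.Dict.empty).items

-- ===== PRECONDITION & SPEC =====
-- Pre_ excludes association lists with duplicate keys: they do not represent a Python dict
-- (A's input type), whose keys are necessarily distinct.
def Pre_map_capitalisation_termlist (candidate_term_dict : List (String × List String)) : Prop :=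
  (candidate_term_dict.map Prod.fst).Nodup
instance (candidate_term_dict : List (String × List String)) : Decidable (Pre_map_capitalisation_termlist candidate_term_dict) := by unfold Pre_map_capitalisation_termlist; infer_instance

def pvWitness_map_capitalisation_termlist : (List (String × List String)) :=
  [("Foo", ["a.txt"]), ("FOO", ["b.txt", "c.txt"]), ("bar", ["a.txt"])]

def Spec_map_capitalisation_termlist (candidate_term_dict : List (String × List String)) (out : List (String × List String)) : Prop := out = map_capitalisation_termlist_alt candidate_term_dict
instance (candidate_term_dict : List (String × List String)) (out : List (String × List String)) : Decidable (Spec_map_capitalisation_termlist candidate_term_dict out) := by unfold Spec_map_capitalisation_termlist; infer_instance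

-- ===== CLAIM (what is proved, stated in full; the proofs are below) =====
def Claim_equal_map_capitalisation_termlist : Prop := ∀ (candidate_term_dict : List (String × List String)), Dom_map_capitalisation_termlist candidate_term_dict → Pre_map_capitalisation_termlist candidate_term_dict → Spec_map_capitalisation_termlist candidate_term_dict (map_capitalisation_termlist candidate_term_dict)

-- ===== LEMMAS AND PROOFS =====

-- proof-only definitions: the common shape both ports are reduced to.
-- pvGrp d l = the bucket of entries whose lowercased key is l; pvKey/pvVal = the resolved
-- output key and merged file list of that bucket; pvPVal = the partially accumulated value
-- after A has processed a prefix p of the input; pvItems d p = A's dict contents at that point.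
def pvGrp (d : List (String × List String)) (l : String) : List (String × List String) :=
  d.filter (fun p => PySem.Str.lower p.1 == l)

def pvBetter (q b : String × List String) : Bool :=
  decide (pyCaps q.1 < pyCaps b.1) ||
    (!decide (pyCaps b.1 < pyCaps q.1) && decide (-((q.2.length : Int)) < -((b.2.length : Int))))

def pvBest (m : String × List String) (t : List (String × List String)) : String × List String :=
  t.foldl (fun b q => if pvBetter q b then q else b) m

def pvKey (d : List (String × List String)) (l : String) : String :=
  if (d.map Prod.fst).contains l then l
  else match pvGrp d l with
       | [] => l
       | m :: t => (pvBest m t).1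

def pvVal (d : List (String × List String)) (l : String) : List String :=
  (pvGrp d l).flatMap (fun m => m.2)

def pvLows (p : List (String × List String)) : List String :=
  p.map (fun q => PySem.Str.lower q.1)

def pvPVal (d p : List (String × List String)) (l : String) : List String :=
  if (d.map Prod.fst).contains l then (pvGrp p l).flatMap (fun m => m.2) else pvVal d l

def pvItems (d p : List (String × List String)) : List (String × List String) :=
  (PySem.List.dedup (pvLows p)).map (fun l => (pvKey d l, pvPVal d p l))

theorem dedup_append_singleton {α : Type} [BEq α] [LawfulBEq α] (L : List α) (a : α) :
    PySem.List.dedup (L ++ [a])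
      = if a ∈ L then PySem.List.dedup L else PySem.List.dedup L ++ [a] := by
  have hstep : PySem.List.dedup (L ++ [a]) = PySem.Set.add (PySem.List.dedup L) a := by
    show PySem.Set.ofList (L ++ [a]) = PySem.Set.add (PySem.Set.ofList L) a
    rw [PySem.Set.ofList, PySem.Set.ofList, List.foldl_append, List.foldl_cons, List.foldl_nil]
  have hc : (PySem.List.dedup L).contains a = decide (a ∈ L) := by
    simp [PySem.List.dedup, PySem.Set.mem_ofList]
  rw [hstep, PySem.Set.add]
  show (if (PySem.List.dedup L).contains a = true then _ else _) = _
  rw [hc]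
  simp only [decide_eq_true_eq]

theorem grp_nil_of_not_mem_lows {p : List (String × List String)} {l : String}
    (h : l ∉ pvLows p) : pvGrp p l = [] := by
  rw [pvGrp, List.filter_eq_nil_iff]
  intro q hq
  simp only [beq_iff_eq]
  intro he
  exact h (he ▸ List.mem_map.2 ⟨q, hq, rfl⟩)

theorem grp_append {p : List (String × List String)} (x : String × List String) (l : String) :
    pvGrp (p ++ [x]) l
      = pvGrp p l ++ (if PySem.Str.lower x.1 = l then [x] else []) := by
  rw [pvGrp, List.filter_append, pvGrp]
  congr 1
  split <;> rename_i h
  · simp [List.filter, h]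
  · simp [List.filter, beq_eq_false_iff_ne.2 h]

theorem lows_append (p : List (String × List String)) (x : String × List String) :
    pvLows (p ++ [x]) = pvLows p ++ [PySem.Str.lower x.1] := by
  simp [pvLows]

theorem count_lows (d : List (String × List String)) (l : String) :
    ((d.map Prod.fst).map PySem.Str.lower).count l = (pvGrp d l).length := by
  rw [List.map_map, pvGrp, ← List.countP_eq_length_filter, List.count_eq_countP, List.countP_map]
  rfl


-- string layer: Python str.lower is idempotent on every character
theorem char_le_iff (a b : Char) : a ≤ b ↔ a.toNat ≤ b.toNat := ge_iff_le
theorem lowerChar_not_upper (c : Char) :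
    PySem.Chars.isupper (PySem.Chars.lowerChar c) = false := by
  by_cases h : PySem.Chars.isupper c = true
  · have h1 : 'A' ≤ c ∧ c ≤ 'Z' := by simpa [PySem.Chars.isupper] using h
    have hA : 'A'.toNat = 65 := rfl
    have hZ : 'Z'.toNat = 90 := rfl
    have hb : 65 ≤ c.toNat ∧ c.toNat ≤ 90 :=
      ⟨hA ▸ (char_le_iff _ _).1 h1.1, hZ ▸ (char_le_iff _ _).1 h1.2⟩
    have hv : Nat.isValidChar (c.toNat + 32) := by left; omega
    have ht : (PySem.Chars.lowerChar c).toNat = c.toNat + 32 := by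
      simp [PySem.Chars.lowerChar, h, Char.ofNat, dif_pos hv, Char.toNat_ofNatAux]
    simp only [PySem.Chars.isupper, Bool.and_eq_false_iff, decide_eq_false_iff_not,
      char_le_iff, ht, hA, hZ]
    omega
  · simp only [Bool.not_eq_true] at h
    simp [PySem.Chars.lowerChar, h]
theorem lowerChar_idem (c : Char) :
    PySem.Chars.lowerChar (PySem.Chars.lowerChar c) = PySem.Chars.lowerChar c := by
  have hx := lowerChar_not_upper c
  generalize PySem.Chars.lowerChar c = x at hx ⊢
  simp [PySem.Chars.lowerChar, hx]
theorem lower_idem (s : String) :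
    PySem.Str.lower (PySem.Str.lower s) = PySem.Str.lower s := by
  simp [PySem.Str.lower, PySem.Chars.lower, String.toList_ofList, List.map_map,
    Function.comp_def, lowerChar_idem]
theorem ne_lower_of_ne_lower (ct k : String) (h : ct ≠ PySem.Str.lower ct) :
    ct ≠ PySem.Str.lower k := by
  intro he; exact h (by rw [he, lower_idem])

-- membership facts
theorem mem_lows_lower {p : List (String × List String)} {l : String}
    (h : l ∈ pvLows p) : PySem.Str.lower l = l := by
  simp only [pvLows, List.mem_map] at h
  obtain ⟨q, -, rfl⟩ := h
  exact lower_idem q.1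

theorem mem_grp_lower {d : List (String × List String)} {l : String} {q : String × List String}
    (h : q ∈ pvGrp d l) : PySem.Str.lower q.1 = l := by
  have := List.of_mem_filter h
  simpa using this

theorem mem_grp_sub {d : List (String × List String)} {l : String} {q : String × List String}
    (h : q ∈ pvGrp d l) : q ∈ d := List.mem_of_mem_filter h

theorem pvBest_mem (m : String × List String) (t : List (String × List String)) :
    pvBest m t = m ∨ pvBest m t ∈ t := by
  induction t generalizing m with
  | nil => left; rfl
  | cons q t ih =>
    rcases ih (if pvBetter q m then q else m) with h | h
    · unfold pvBest at h ⊢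
      rw [List.foldl_cons, h]
      split
      · right; exact List.mem_cons_self ..
      · left; rfl
    · unfold pvBest at h ⊢
      rw [List.foldl_cons]
      right; exact List.mem_cons_of_mem _ h

theorem key_lower {d : List (String × List String)} {l : String}
    (hl : PySem.Str.lower l = l) : PySem.Str.lower (pvKey d l) = l := by
  unfold pvKey
  split
  · exact hl
  · split
    · exact hl
    · rename_i m t hgrp
      rcases pvBest_mem m t with h | h
      · rw [h]; exact mem_grp_lower (hgrp ▸ List.mem_cons_self ..)
      · exact mem_grp_lower (hgrp ▸ List.mem_cons_of_mem _ h)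

theorem grp_ne_nil_of_mem_lows {d : List (String × List String)} {l : String}
    (h : l ∈ pvLows d) : pvGrp d l ≠ [] := by
  simp only [pvLows, List.mem_map] at h
  obtain ⟨q, hq, rfl⟩ := h
  have : q ∈ pvGrp d (PySem.Str.lower q.1) := by
    simp [pvGrp, List.mem_filter, hq]
  intro hnil; rw [hnil] at this; exact (List.not_mem_nil) this

theorem grp_any_self {d : List (String × List String)} {l : String}
    (hl : PySem.Str.lower l = l) :
    (pvGrp d l).any (fun m => m.1 == l) = (d.map Prod.fst).contains l := by
  rcases h : (d.map Prod.fst).contains l with _ | _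
  · simp only [List.any_eq_false]
    intro m hm
    simp only [beq_iff_eq]
    intro he
    have hmm : l ∈ d.map Prod.fst := List.mem_map.2 ⟨m, mem_grp_sub hm, he⟩
    exact absurd hmm (by simpa using h)
  · simp only [List.contains_iff_mem, List.mem_map] at h
    obtain ⟨q, hq, hq1⟩ := h
    have hmem : q ∈ pvGrp d l := by
      simp [pvGrp, List.mem_filter, hq, hq1, hl]
    simp only [List.any_eq_true]
    exact ⟨q, hmem, by simp [hq1]⟩

theorem foldl_some {α β : Type} (g : α → β → α) (st : Option α → β → Option α)
    (h : ∀ a b, st (some a) b = some (g a b)) :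
    ∀ (xs : List β) (a : α), xs.foldl st (some a) = some (xs.foldl g a) := by
  intro xs
  induction xs with
  | nil => intro a; rfl
  | cons q t ih => intro a; rw [List.foldl_cons, List.foldl_cons, h]; exact ih _

theorem min2?_cons {α : Type} (m : α) (xs : List α) (k1 k2 : α → Int) :
    PySem.List.min2? (m :: xs) k1 k2
      = some (xs.foldl (fun b q =>
          if (decide (k1 q < k1 b) || (!decide (k1 b < k1 q) && decide (k2 q < k2 b))) then q else b) m) := by
  show List.foldl _ (some m) xs = _
  exact foldl_some _ _ (fun a b => by
    show (if (decide (k1 b < k1 a) || (!decide (k1 a < k1 b) && decide (k2 b < k2 a))) = true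
          then some b else some a) = _
    exact (apply_ite some _ b a).symm) xs m

-- B's groups dict, characterised
theorem groups_items (d : List (String × List String)) :
    (d.foldl (fun g p => g.modify (PySem.Str.lower p.1) [] (fun ms => ms ++ [p])) PySem.Dict.empty).items
      = (PySem.List.dedup (pvLows d)).map (fun l => (l, pvGrp d l)) := by
  set G := d.foldl (fun g p => g.modify (PySem.Str.lower p.1) [] (fun ms => ms ++ [p])) PySem.Dict.empty with hG
  have hkeys : G.keys = PySem.List.dedup (pvLows d) := by
    rw [hG, PySem.Dict.keys_foldl_modify_key d (fun p => PySem.Str.lower p.1) []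
      (fun _ p => fun ms => ms ++ [p]) PySem.Dict.empty]
    rfl
  have hnd : G.keys.Nodup := by
    rw [hkeys]; exact PySem.List.nodup_dedup _

  have hget : ∀ l, G.getD l [] = pvGrp d l := by
    intro l
    have hmap : G = (d.map (fun p => (PySem.Str.lower p.1, p))).foldl
        (fun g q => g.modify q.1 [] (fun ms => ms ++ [q.2])) PySem.Dict.empty := by
      rw [hG, List.foldl_map]
    rw [hmap, PySem.Dict.getD_foldl_modify_append]
    simp only [PySem.Dict.getD_empty]
    rw [List.filter_map]
    simp [Function.comp_def, List.map_map, pvGrp]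
  rw [PySem.Dict.items_eq_map_keys G hnd []]
  rw [hkeys]
  exact List.map_congr_left (fun l _ => by rw [hget l])

theorem altResolve_eq (d : List (String × List String)) (l : String)
    (hl : PySem.Str.lower l = l) (hg : pvGrp d l ≠ [])
    (o : PySem.Dict String (List String)) :
    altResolve o (l, pvGrp d l) = o.insert (pvKey d l) (pvVal d l) := by
  unfold altResolve pvKey pvVal
  simp only []
  rw [grp_any_self hl]
  rcases hc : (d.map Prod.fst).contains l with _ | _
  · simp only [Bool.false_eq_true, if_false]
    obtain ⟨m, t, hmt⟩ : ∃ m t, pvGrp d l = m :: t := by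
      cases h : pvGrp d l with
      | nil => exact absurd h hg
      | cons m t => exact ⟨m, t, rfl⟩
    rw [hmt]
    cases t with
    | nil =>
      simp [pvBest]
    | cons q t' =>
      have hlen : ((m :: q :: t').length == 1) = false := by simp
      rw [hlen]
      simp only [Bool.false_eq_true, if_false]
      rw [min2?_cons]
      simp [pvBest, pvBetter]
  · simp

theorem out_fold (d : List (String × List String)) :
    ∀ (L : List String) (o : PySem.Dict String (List String)),
    (∀ l ∈ L, PySem.Str.lower l = l) → (∀ l ∈ L, pvGrp d l ≠ []) →
    (L.map (pvKey d)).Nodup → (∀ l ∈ L, o.contains (pvKey d l) = false) →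
    ((L.map (fun l => (l, pvGrp d l))).foldl altResolve o).items
      = o.items ++ L.map (fun l => (pvKey d l, pvVal d l)) := by
  intro L
  induction L with
  | nil => intro o _ _ _ _; simp
  | cons l L ih =>
    intro o hl hg hnd hfresh
    rw [List.map_cons, List.foldl_cons,
      altResolve_eq d l (hl l (List.mem_cons_self ..)) (hg l (List.mem_cons_self ..)) o]
    rw [List.map_cons]
    have hfr : o.contains (pvKey d l) = false := hfresh l (List.mem_cons_self ..)
    have hstep := PySem.Dict.items_insert_of_not_contains o (pvVal d l) hfr
    rw [ih (o.insert (pvKey d l) (pvVal d l))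
        (fun x hx => hl x (List.mem_cons_of_mem _ hx))
        (fun x hx => hg x (List.mem_cons_of_mem _ hx))
        (by rw [List.map_cons] at hnd; exact List.Nodup.of_cons hnd)
        (fun x hx => by
          rw [PySem.Dict.contains_insert]
          have hne : pvKey d x ≠ pvKey d l := by
            intro he
            rw [List.map_cons, List.nodup_cons] at hnd
            exact hnd.1 (he ▸ List.mem_map.2 ⟨x, hx, rfl⟩)
          simp [hne, hfresh x (List.mem_cons_of_mem _ hx)])]
    rw [hstep]
    simp
theorem key_inj_on {d : List (String × List String)} {l1 l2 : String}
    (h1 : PySem.Str.lower l1 = l1) (h2 : PySem.Str.lower l2 = l2)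
    (he : pvKey d l1 = pvKey d l2) : l1 = l2 := by
  have := congrArg PySem.Str.lower he
  rwa [key_lower h1, key_lower h2] at this

theorem alt_eq_spec (d : List (String × List String)) :
    map_capitalisation_termlist_alt d
      = (PySem.List.dedup (pvLows d)).map (fun l => (pvKey d l, pvVal d l)) := by
  show (List.foldl altResolve PySem.Dict.empty
      (List.foldl (fun g p => g.modify (PySem.Str.lower p.1) [] fun ms => ms ++ [p])
        PySem.Dict.empty d).items).items = _
  rw [groups_items]
  rw [out_fold d (PySem.List.dedup (pvLows d)) PySem.Dict.empty
      (fun l hl => mem_lows_lower ((PySem.List.mem_dedup _ _).1 hl))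
      (fun l hl => grp_ne_nil_of_mem_lows ((PySem.List.mem_dedup _ _).1 hl))
      (List.Nodup.map_on
        (fun l1 h1 l2 h2 he =>
          key_inj_on (mem_lows_lower ((PySem.List.mem_dedup _ _).1 h1))
            (mem_lows_lower ((PySem.List.mem_dedup _ _).1 h2)) he)
        (PySem.List.nodup_dedup _))
      (fun l _ => PySem.Dict.contains_empty _)]
  rfl
theorem spec_keys (d p : List (String × List String)) :
    (PySem.Dict.mk (pvItems d p)).keys = (PySem.List.dedup (pvLows p)).map (pvKey d) := by
  show (pvItems d p).map Prod.fst = _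
  rw [pvItems, List.map_map]
  rfl

theorem mem_dedup_lows_lower {p : List (String × List String)} {l : String}
    (h : l ∈ PySem.List.dedup (pvLows p)) : PySem.Str.lower l = l :=
  mem_lows_lower ((PySem.List.mem_dedup _ _).1 h)

theorem spec_keys_lower (d p : List (String × List String)) :
    ((PySem.Dict.mk (pvItems d p)).keys.map PySem.Str.lower) = PySem.List.dedup (pvLows p) := by
  rw [spec_keys, List.map_map]
  have : ∀ l ∈ PySem.List.dedup (pvLows p), (PySem.Str.lower ∘ pvKey d) l = id l := by
    intro l hl
    exact key_lower (mem_dedup_lows_lower hl)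
  rw [List.map_congr_left this, List.map_id]

theorem spec_nodup_keys (d p : List (String × List String)) :
    (PySem.Dict.mk (pvItems d p)).keys.Nodup := by
  rw [spec_keys]
  exact List.Nodup.map_on
    (fun l1 h1 l2 h2 he =>
      key_inj_on (mem_dedup_lows_lower h1) (mem_dedup_lows_lower h2) he)
    (PySem.List.nodup_dedup _)

theorem spec_not_contains (d p : List (String × List String)) (c : String)
    (h : PySem.Str.lower c ∉ PySem.List.dedup (pvLows p)) :
    (PySem.Dict.mk (pvItems d p)).contains c = false := by
  rcases hc : (PySem.Dict.mk (pvItems d p)).contains c with _ | _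
  · rfl
  · exfalso
    have hk := (PySem.Dict.contains_iff_mem_keys _ _).1 hc
    rw [spec_keys] at hk
    obtain ⟨l, hl, he⟩ := List.mem_map.1 hk
    have : PySem.Str.lower c = l := by rw [← he, key_lower (mem_dedup_lows_lower hl)]
    exact h (this ▸ hl)

theorem spec_contains_of (d p : List (String × List String)) {lct : String}
    (hmem : lct ∈ PySem.List.dedup (pvLows p)) (hk : pvKey d lct = lct) :
    (PySem.Dict.mk (pvItems d p)).contains lct = true := by
  rw [PySem.Dict.contains_iff_mem_keys, spec_keys]
  exact List.mem_map.2 ⟨lct, hmem, hk⟩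

theorem spec_getD (d p : List (String × List String)) {lct : String}
    (hmem : lct ∈ PySem.List.dedup (pvLows p)) (hk : pvKey d lct = lct) :
    (PySem.Dict.mk (pvItems d p)).getD lct [] = pvPVal d p lct := by
  have hin : (lct, pvPVal d p lct) ∈ pvItems d p := by
    rw [pvItems]
    exact List.mem_map.2 ⟨lct, hmem, by rw [hk]⟩
  exact PySem.Dict.getD_of_mem_items _ hin (spec_nodup_keys d p) []
theorem scan_spec :
    ∀ (t : List (String × List String)) (m : String × List String) (comb : List String),
    t.foldl
      (fun s q =>
        let combined := s.2.2.2 ++ q.2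
        let nc := pyCaps q.1
        if nc < s.2.1 then (q.1, nc, (q.2.length : Int), combined)
        else if nc == s.2.1 && (q.2.length : Int) > s.2.2.1 then (q.1, nc, (q.2.length : Int), combined)
        else (s.1, s.2.1, s.2.2.1, combined))
      (m.1, pyCaps m.1, (m.2.length : Int), comb)
      = ((pvBest m t).1, pyCaps (pvBest m t).1, ((pvBest m t).2.length : Int),
          comb ++ t.flatMap (fun q => q.2)) := by
  intro t
  induction t with
  | nil => intro m comb; simp [pvBest]
  | cons q t ih =>
    intro m comb
    rw [List.foldl_cons]
    have hbest : pvBest m (q :: t) = pvBest (if pvBetter q m then q else m) t := by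
      unfold pvBest; rw [List.foldl_cons]
    have hstep :
        (if pyCaps q.1 < pyCaps m.1 then (q.1, pyCaps q.1, (q.2.length : Int), comb ++ q.2)
         else if (pyCaps q.1 == pyCaps m.1 && decide ((q.2.length : Int) > (m.2.length : Int))) = true
              then (q.1, pyCaps q.1, (q.2.length : Int), comb ++ q.2)
              else (m.1, pyCaps m.1, (m.2.length : Int), comb ++ q.2))
        = ((if pvBetter q m then q else m).1,
            pyCaps (if pvBetter q m then q else m).1,
            (((if pvBetter q m then q else m).2.length : Int)),
            comb ++ q.2) := by
      by_cases h1 : pyCaps q.1 < pyCaps m.1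
      · have hb : pvBetter q m = true := by
          unfold pvBetter; simp [h1]
        rw [if_pos h1, hb, if_pos rfl]
      · rw [if_neg h1]
        by_cases h2 : pyCaps q.1 = pyCaps m.1 ∧ (m.2.length : Int) < (q.2.length : Int)
        · have hcond : (pyCaps q.1 == pyCaps m.1 && decide ((q.2.length : Int) > (m.2.length : Int))) = true := by
            simp [h2.1, h2.2]
          have hb : pvBetter q m = true := by
            unfold pvBetter
            simp only [Bool.or_eq_true, Bool.and_eq_true, Bool.not_eq_true', decide_eq_true_eq,
              decide_eq_false_iff_not]
            right
            exact ⟨by omega, by omega⟩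
          rw [hcond, if_pos rfl, hb, if_pos rfl]
        · have hcond : (pyCaps q.1 == pyCaps m.1 && decide ((q.2.length : Int) > (m.2.length : Int))) = false := by
            rcases Decidable.em (pyCaps q.1 = pyCaps m.1) with he | he
            · simp only [he, beq_self_eq_true, Bool.true_and, gt_iff_lt,
                decide_eq_false_iff_not, not_lt]
              omega
            · simp [he]
          have hb : pvBetter q m = false := by
            unfold pvBetter
            simp only [Bool.or_eq_false_iff, Bool.and_eq_false_iff]
            refine ⟨by simpa using h1, ?_⟩
            rcases Decidable.em (pyCaps q.1 = pyCaps m.1) with he | he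
            · right; simp; omega
            · left; simp; omega
          rw [hcond, if_neg (by simp), hb, if_neg (by simp)]
    rw [show (List.foldl
        (fun (s : String × Int × Int × List String) q =>
          let combined := s.2.2.2 ++ q.2
          let nc := pyCaps q.1
          if nc < s.2.1 then (q.1, nc, (q.2.length : Int), combined)
          else if nc == s.2.1 && (q.2.length : Int) > s.2.2.1 then (q.1, nc, (q.2.length : Int), combined)
          else (s.1, s.2.1, s.2.2.1, combined))
        ((fun (s : String × Int × Int × List String) q =>
          let combined := s.2.2.2 ++ q.2
          let nc := pyCaps q.1
          if nc < s.2.1 then (q.1, nc, (q.2.length : Int), combined)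
          else if nc == s.2.1 && (q.2.length : Int) > s.2.2.1 then (q.1, nc, (q.2.length : Int), combined)
          else (s.1, s.2.1, s.2.2.1, combined)) (m.1, pyCaps m.1, (m.2.length : Int), comb) q) t)
      = (List.foldl
        (fun (s : String × Int × Int × List String) q =>
          let combined := s.2.2.2 ++ q.2
          let nc := pyCaps q.1
          if nc < s.2.1 then (q.1, nc, (q.2.length : Int), combined)
          else if nc == s.2.1 && (q.2.length : Int) > s.2.2.1 then (q.1, nc, (q.2.length : Int), combined)
          else (s.1, s.2.1, s.2.2.1, combined))
        ((if pvBetter q m then q else m).1,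
            pyCaps (if pvBetter q m then q else m).1,
            (((if pvBetter q m then q else m).2.length : Int)),
            comb ++ q.2) t) from by rw [← hstep]]
    rw [hbest, ih]
    rw [List.flatMap_cons, ← List.append_assoc]

theorem key_notin_tail {d p s : List (String × List String)} {x : String × List String}
    (hd : d = p ++ x :: s) (hnd : (d.map Prod.fst).Nodup) : x.1 ∉ s.map Prod.fst := by
  subst hd
  rw [List.map_append, List.map_cons] at hnd
  have h1 : (x.1 :: s.map Prod.fst).Nodup := hnd.of_append_right
  exact (List.nodup_cons.1 h1).1

theorem inner_eq {d p s : List (String × List String)} {x : String × List String}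
    (hd : d = p ++ x :: s) (hnd : (d.map Prod.fst).Nodup)
    (hgx : pvGrp p (PySem.Str.lower x.1) = []) :
    mapCapsInner d x.1 x.2
      = ((pvBest x (pvGrp s (PySem.Str.lower x.1))).1,
         pyCaps (pvBest x (pvGrp s (PySem.Str.lower x.1))).1,
         (((pvBest x (pvGrp s (PySem.Str.lower x.1))).2.length : Int)),
         x.2 ++ (pvGrp s (PySem.Str.lower x.1)).flatMap (fun q => q.2)) := by
  have hfilter : d.filter (fun q => PySem.Str.lower x.1 == PySem.Str.lower q.1 && q.1 != x.1)
      = pvGrp s (PySem.Str.lower x.1) := by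
    subst hd
    rw [List.filter_append, List.filter_cons]
    have hxf : (PySem.Str.lower x.1 == PySem.Str.lower x.1 && x.1 != x.1) = false := by simp
    rw [hxf]
    have hpf : p.filter (fun q => PySem.Str.lower x.1 == PySem.Str.lower q.1 && q.1 != x.1) = [] := by
      rw [List.filter_eq_nil_iff]
      intro q hq hguard
      simp only [Bool.and_eq_true, beq_iff_eq, bne_iff_ne] at hguard
      have : q ∈ pvGrp p (PySem.Str.lower x.1) := by
        rw [pvGrp, List.mem_filter]
        exact ⟨hq, by simp [hguard.1.symm]⟩
      rw [hgx] at this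
      exact List.not_mem_nil this
    rw [hpf, List.nil_append]
    have hnotin := key_notin_tail rfl hnd
    rw [pvGrp]
    apply List.filter_congr
    intro q hq
    have hq1 : q.1 ≠ x.1 := by
      intro he
      exact hnotin (he ▸ List.mem_map.2 ⟨q, hq, rfl⟩)
    show (PySem.Str.lower x.1 == PySem.Str.lower q.1 && q.1 != x.1)
        = (PySem.Str.lower q.1 == PySem.Str.lower x.1)
    by_cases he : PySem.Str.lower x.1 = PySem.Str.lower q.1
    · simp [he, hq1]
    · have he2 : PySem.Str.lower q.1 ≠ PySem.Str.lower x.1 := fun h => he h.symm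
      rw [beq_eq_false_iff_ne.mpr he, beq_eq_false_iff_ne.mpr he2, Bool.false_and]
  rw [mapCapsInner, ← List.foldl_filter, hfilter]
  exact scan_spec (pvGrp s (PySem.Str.lower x.1)) x x.2

theorem pval_append {d p : List (String × List String)} (x : String × List String) (l : String)
    (hne : PySem.Str.lower x.1 ≠ l) : pvPVal d (p ++ [x]) l = pvPVal d p l := by
  unfold pvPVal
  split
  · rw [grp_append, if_neg hne, List.append_nil]
  · rfl

theorem contains_lows_of_ne {d : List (String × List String)} {ct : String}
    (h : ct ≠ PySem.Str.lower ct) :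
    (((d.map Prod.fst).map PySem.Str.lower).contains ct) = false := by
  rcases hc : ((d.map Prod.fst).map PySem.Str.lower).contains ct with _ | _
  · rfl
  · exfalso
    have := List.contains_iff_mem.1 hc
    obtain ⟨k, -, hk⟩ := List.mem_map.1 this
    exact ne_lower_of_ne_lower ct k h hk.symm

theorem items_append_first (d p : List (String × List String)) (x : String × List String)
    (hm : PySem.Str.lower x.1 ∉ pvLows p) :
    pvItems d (p ++ [x])
      = pvItems d p
        ++ [(pvKey d (PySem.Str.lower x.1), pvPVal d (p ++ [x]) (PySem.Str.lower x.1))] := by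
  rw [pvItems, lows_append, dedup_append_singleton, if_neg hm, List.map_append,
    List.map_cons, List.map_nil, pvItems]
  congr 1
  apply List.map_congr_left
  intro l hl
  have hlne : PySem.Str.lower x.1 ≠ l := by
    intro he
    exact hm (he ▸ ((PySem.List.mem_dedup _ _).1 hl))
  rw [pval_append x l hlne]

theorem items_unchanged_nk (d p : List (String × List String)) (x : String × List String)
    (hKc : (d.map Prod.fst).contains (PySem.Str.lower x.1) = false)
    (hm : PySem.Str.lower x.1 ∈ pvLows p) :
    pvItems d (p ++ [x]) = pvItems d p := by
  rw [pvItems, lows_append, dedup_append_singleton, if_pos hm, pvItems]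
  apply List.map_congr_left
  intro l hl
  by_cases he : PySem.Str.lower x.1 = l
  · rw [← he]
    rw [pvPVal, pvPVal, if_neg (by rw [hKc]; exact Bool.false_ne_true),
      if_neg (by rw [hKc]; exact Bool.false_ne_true)]
  · rw [pval_append x l he]

theorem stepA_spec (d p s : List (String × List String)) (x : String × List String)
    (hd : d = p ++ x :: s) (hnd : (d.map Prod.fst).Nodup) :
    mapCapsStep d (PySem.Dict.mk (pvItems d p)) x = PySem.Dict.mk (pvItems d (p ++ [x])) := by
  have hll : PySem.Str.lower (PySem.Str.lower x.1) = PySem.Str.lower x.1 := lower_idem x.1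
  have hxd : x ∈ d := hd ▸ List.mem_append_right p (List.mem_cons_self ..)
  have hitems : pvItems d (p ++ [x])
      = (PySem.List.dedup (pvLows p ++ [PySem.Str.lower x.1])).map
          (fun l => (pvKey d l, pvPVal d (p ++ [x]) l)) := by
    rw [pvItems, lows_append]
  have hgrp_d : pvGrp d (PySem.Str.lower x.1)
      = pvGrp p (PySem.Str.lower x.1) ++ x :: pvGrp s (PySem.Str.lower x.1) := by
    rw [hd, pvGrp, List.filter_append, List.filter_cons, if_pos (by simp)]
    rfl
  rcases hKc : ((d.map Prod.fst).contains (PySem.Str.lower x.1)) with _ | _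
  -- lowercase form is NOT a key of d
  · have hne : x.1 ≠ PySem.Str.lower x.1 := by
      intro he
      rw [← he] at hKc
      have : x.1 ∈ d.map Prod.fst := List.mem_map.2 ⟨x, hxd, rfl⟩
      have h2 := List.contains_iff_mem.2 this
      rw [hKc] at h2
      exact Bool.false_ne_true h2
    have hcond : (x.1 == PySem.Str.lower x.1 || (d.map Prod.fst).contains (PySem.Str.lower x.1)) = false := by
      rw [hKc, Bool.or_false]
      exact beq_eq_false_iff_ne.mpr hne
    rw [mapCapsStep]
    simp only [hcond, Bool.false_eq_true, if_false]
    rw [count_lows]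
    by_cases hm : PySem.Str.lower x.1 ∈ pvLows p
    -- group already handled (or pending): A leaves the dict unchanged
    · have hpne : pvGrp p (PySem.Str.lower x.1) ≠ [] := grp_ne_nil_of_mem_lows hm
      have hlen : ((pvGrp d (PySem.Str.lower x.1)).length == 1) = false := by
        rw [hgrp_d]
        cases hp : pvGrp p (PySem.Str.lower x.1) with
        | nil => exact absurd hp hpne
        | cons a b => simp
      rw [hlen]
      simp only [Bool.false_eq_true, if_false]
      have hkeys : (List.map PySem.Str.lower (PySem.Dict.mk (pvItems d p)).keys).contains
          (PySem.Str.lower x.1) = true := by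
        rw [spec_keys_lower]
        exact List.contains_iff_mem.2 ((PySem.List.mem_dedup _ _).2 hm)
      rw [hkeys, show (decide ((true : Bool) = false)) = false from rfl, Bool.and_false]
      simp only [Bool.false_eq_true, if_false]
      apply PySem.Dict.ext
      show pvItems d p = pvItems d (p ++ [x])
      rw [items_unchanged_nk d p x hKc hm]
    -- first member of an all-capitalised group
    · have hgp : pvGrp p (PySem.Str.lower x.1) = [] := grp_nil_of_not_mem_lows hm
      have hgd : pvGrp d (PySem.Str.lower x.1) = x :: pvGrp s (PySem.Str.lower x.1) := by
        rw [hgrp_d, hgp, List.nil_append]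
      have hkey : pvKey d (PySem.Str.lower x.1)
          = (pvBest x (pvGrp s (PySem.Str.lower x.1))).1 := by
        rw [pvKey, if_neg (by rw [hKc]; exact Bool.false_ne_true), hgd]
      have hnDP : PySem.Str.lower x.1 ∉ PySem.List.dedup (pvLows p) :=
        fun hc => hm ((PySem.List.mem_dedup _ _).1 hc)
      cases ht : pvGrp s (PySem.Str.lower x.1) with
      | nil =>
        -- singleton group: insert ct as-is
        have hlen : ((pvGrp d (PySem.Str.lower x.1)).length == 1) = true := by
          rw [hgd, ht]; rfl
        rw [hlen]
        simp only [if_true]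
        have hna : (PySem.Dict.mk (pvItems d p)).contains x.1 = false := by
          apply spec_not_contains
          exact fun hc => hnDP (lower_idem x.1 ▸ hc)
        apply PySem.Dict.ext
        rw [PySem.Dict.items_insert_of_not_contains _ _ hna]
        show pvItems d p ++ [(x.1, x.2)] = _
        rw [items_append_first d p x hm, hkey, ht]
        have hval : pvPVal d (p ++ [x]) (PySem.Str.lower x.1) = x.2 := by
          rw [pvPVal, if_neg (by rw [hKc]; exact Bool.false_ne_true), pvVal, hgd, ht]
          simp
        rw [hval]
        rfl
      | cons a b =>
        -- several all-capitalised variants: the inner scan picks the canonical one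
        have hlen : ((pvGrp d (PySem.Str.lower x.1)).length == 1) = false := by
          rw [hgd, ht]; simp
        rw [hlen]
        simp only [Bool.false_eq_true, if_false]
        have hg1 : (List.map PySem.Str.lower (List.map Prod.fst d)).contains x.1 = false := by
          have := contains_lows_of_ne (d := d) hne
          rwa [List.map_map] at this ⊢
        have hg2 : (List.map PySem.Str.lower (PySem.Dict.mk (pvItems d p)).keys).contains
            (PySem.Str.lower x.1) = false := by
          rw [spec_keys_lower]
          rcases hc : (PySem.List.dedup (pvLows p)).contains (PySem.Str.lower x.1) with _ | _
          · rfl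
          · exact absurd (List.contains_iff_mem.1 hc) hnDP
        rw [hg1, hg2, show (decide ((false : Bool) = false)) = true from rfl, Bool.and_true,
          if_pos rfl]
        rw [inner_eq hd hnd hgp]
        have hbm : pvBest x (pvGrp s (PySem.Str.lower x.1)) ∈ pvGrp d (PySem.Str.lower x.1) := by
          rw [hgd]
          rcases pvBest_mem x (pvGrp s (PySem.Str.lower x.1)) with h | h
          · rw [h]; exact List.mem_cons_self ..
          · exact List.mem_cons_of_mem _ h
        have hna : (PySem.Dict.mk (pvItems d p)).contains
            (pvBest x (pvGrp s (PySem.Str.lower x.1))).1 = false := by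
          apply spec_not_contains
          rw [mem_grp_lower hbm]
          exact hnDP
        apply PySem.Dict.ext
        rw [PySem.Dict.items_insert_of_not_contains _ _ hna]
        show pvItems d p ++ [_] = _
        rw [items_append_first d p x hm, hkey]
        have hval : pvPVal d (p ++ [x]) (PySem.Str.lower x.1)
            = x.2 ++ (pvGrp s (PySem.Str.lower x.1)).flatMap (fun q => q.2) := by
          rw [pvPVal, if_neg (by rw [hKc]; exact Bool.false_ne_true), pvVal, hgd,
            List.flatMap_cons]
        rw [hval]
  -- lowercase form IS a key of d
  · have hcond : (x.1 == PySem.Str.lower x.1 || (d.map Prod.fst).contains (PySem.Str.lower x.1)) = true := by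
      rw [hKc, Bool.or_true]
    rw [mapCapsStep]
    simp only [hcond, if_true]
    by_cases hm : PySem.Str.lower x.1 ∈ pvLows p
    -- lct already seen in the prefix: the `+=` branch
    · have hmdP : PySem.Str.lower x.1 ∈ PySem.List.dedup (pvLows p) :=
        (PySem.List.mem_dedup _ _).2 hm
      have hkey : pvKey d (PySem.Str.lower x.1) = PySem.Str.lower x.1 := by
        rw [pvKey, if_pos hKc]
      have hacc : (PySem.Dict.mk (pvItems d p)).contains (PySem.Str.lower x.1) = true :=
        spec_contains_of d p hmdP hkey
      rw [if_neg (by simp [hacc])]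
      rw [PySem.Dict.modify, spec_getD d p hmdP hkey]
      have hins := PySem.Dict.items_insert_of_contains (PySem.Dict.mk (pvItems d p))
        (pvPVal d p (PySem.Str.lower x.1) ++ x.2) hacc
      apply PySem.Dict.ext
      rw [hins]
      show List.map _ (pvItems d p) = pvItems d (p ++ [x])
      rw [hitems, dedup_append_singleton, if_pos hm, pvItems, List.map_map]
      apply List.map_congr_left
      intro l hl
      show (if (pvKey d l == PySem.Str.lower x.1) = true
            then (PySem.Str.lower x.1, pvPVal d p (PySem.Str.lower x.1) ++ x.2)
            else (pvKey d l, pvPVal d p l))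
          = (pvKey d l, pvPVal d (p ++ [x]) l)
      by_cases he : l = PySem.Str.lower x.1
      · rw [he, if_pos (by simp [hkey]), hkey]
        have hv : pvPVal d (p ++ [x]) (PySem.Str.lower x.1)
            = pvPVal d p (PySem.Str.lower x.1) ++ x.2 := by
          rw [pvPVal, pvPVal, if_pos hKc, if_pos hKc, grp_append, if_pos rfl,
            List.flatMap_append]
          simp
        rw [hv]
      · have hkne : (pvKey d l == PySem.Str.lower x.1) = false := by
          rw [beq_eq_false_iff_ne]
          intro hc
          apply he
          have hkl := key_lower (d := d) (mem_dedup_lows_lower hl)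
          rw [hc] at hkl
          rw [← hkl, hll]
        rw [hkne]
        simp only [Bool.false_eq_true, if_false]
        rw [pval_append x l (fun hc => he hc.symm)]
    -- first occurrence of lct: plain insert
    · have hna : (PySem.Dict.mk (pvItems d p)).contains (PySem.Str.lower x.1) = false := by
        apply spec_not_contains
        rw [hll]
        exact fun hc => hm ((PySem.List.mem_dedup _ _).1 hc)
      rw [if_pos (by simp [hna])]
      apply PySem.Dict.ext
      rw [PySem.Dict.items_insert_of_not_contains _ _ hna]
      show pvItems d p ++ [(PySem.Str.lower x.1, x.2)] = _
      rw [hitems, dedup_append_singleton, if_neg hm, List.map_append]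
      congr 1
      · rw [pvItems]
        apply List.map_congr_left
        intro l hl
        have hlne : PySem.Str.lower x.1 ≠ l := by
          intro he
          exact hm (he ▸ ((PySem.List.mem_dedup _ _).1 hl))
        rw [pval_append x l hlne]
      · rw [List.map_cons, List.map_nil]
        have hkey : pvKey d (PySem.Str.lower x.1) = PySem.Str.lower x.1 := by
          rw [pvKey, if_pos hKc]
        have hval : pvPVal d (p ++ [x]) (PySem.Str.lower x.1) = x.2 := by
          rw [pvPVal, if_pos hKc, grp_append, if_pos rfl,
            grp_nil_of_not_mem_lows hm]
          simp
        rw [hkey, hval]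

theorem foldA (d : List (String × List String)) (hnd : (d.map Prod.fst).Nodup) :
    ∀ (s p : List (String × List String)), d = p ++ s →
    s.foldl (mapCapsStep d) (PySem.Dict.mk (pvItems d p)) = PySem.Dict.mk (pvItems d d) := by
  intro s
  induction s with
  | nil =>
    intro p hp
    rw [List.foldl_nil, List.append_nil] at *
    rw [hp]
  | cons x s ih =>
    intro p hp
    rw [List.foldl_cons, stepA_spec d p s x hp hnd]
    exact ih (p ++ [x]) (by rw [hp, List.append_assoc]; rfl)

theorem A_eq_spec (d : List (String × List String)) (hnd : (d.map Prod.fst).Nodup) :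
    map_capitalisation_termlist d = pvItems d d := by
  rw [map_capitalisation_termlist]
  have h0 : (PySem.Dict.empty : PySem.Dict String (List String))
      = PySem.Dict.mk (pvItems d []) := rfl
  rw [h0, foldA d hnd d [] rfl]

theorem main_equiv (d : List (String × List String)) (hnd : (d.map Prod.fst).Nodup) :
    map_capitalisation_termlist d = map_capitalisation_termlist_alt d := by
  rw [A_eq_spec d hnd, alt_eq_spec d, pvItems]
  apply List.map_congr_left
  intro l hl
  simp [pvPVal, pvVal]

-- ===== VERDICT (by name: the statement is the Claim_ definition above) =====
theorem map_capitalisation_termlist_spec : Claim_equal_map_capitalisation_termlist := by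
  intro candidate_term_dict _ hpre
  unfold Spec_map_capitalisation_termlist
  exact main_equiv candidate_term_dict hpre
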